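-- pv_equiv track=rewrite | github.com/Karna-Balaji-07/DSA_Sheet | Sliding window/2653. Sliding Subarray Beauty.py | solutions1
-- ===== SOURCE A (Python) =====
-- def solutions1(nums,k,x):
--     freq = [0] * 51
--     result = []
--     temp = 0
--     for i in range(len(nums)):
--         if nums[i] < 0:
--             freq[abs(nums[i])] += 1
--         if i - temp + 1 >= k:
--             count = 0
--             for l in reversed(range(51)):
--                 count += freq[l]
--                 if count >= x:
--                     result.append(-l)
--                     break
--
--             if count < x:
--                 result.append(0)
--             if nums[temp] < 0:
--                 freq[abs(nums[temp])] -= 1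
--             temp += 1
--     return result
-- ===== SOURCE B (Python) =====
-- def solutions1(nums, k, x):
--     result = []
--     for start in range(len(nums) - k + 1):
--         freq = [0] * 51
--         for v in nums[start:start + k]:
--             if v < 0:
--                 freq[abs(v)] += 1
--         count = 0
--         val = 0
--         for l in reversed(range(51)):
--             count += freq[l]
--             if count >= x:
--                 val = -l
--                 break
--         result.append(val)
--     return result
-- ===== Notes on version B (the rewrite author's own statement) =====
-- stated objective: simpler
-- what changed: B recomputes a fresh 51-bucket frequency table from the window slice for each start and maps a single pick over window starts, instead of A's incremental add/remove slide over one shared table with a temp pointer.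
-- outside the precondition, e.g. on solutions1([1, -2], 0, 1): A returns [0, -2], B returns [0, 0, 0]
import Mathlib
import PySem

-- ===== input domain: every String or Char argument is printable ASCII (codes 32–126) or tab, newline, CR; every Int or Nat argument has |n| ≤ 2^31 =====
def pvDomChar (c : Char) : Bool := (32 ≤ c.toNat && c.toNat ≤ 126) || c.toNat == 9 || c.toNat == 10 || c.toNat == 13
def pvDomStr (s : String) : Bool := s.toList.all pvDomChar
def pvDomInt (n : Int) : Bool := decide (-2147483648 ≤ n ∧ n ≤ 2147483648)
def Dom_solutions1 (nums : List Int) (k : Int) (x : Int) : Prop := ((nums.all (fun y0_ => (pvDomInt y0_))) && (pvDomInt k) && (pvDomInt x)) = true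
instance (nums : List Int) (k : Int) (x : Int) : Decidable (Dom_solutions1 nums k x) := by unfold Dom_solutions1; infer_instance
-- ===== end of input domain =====

-- B recomputes a fresh 51-bucket frequency table for every window slice (simpler, no incremental
-- add/remove bookkeeping with a temp pointer); equal return value on Pre_ (k ≥ 1, negatives ≥ -50).

-- ===== PORT A =====
-- freq[j] += d  (Python list in-place update; index in range under Pre_)
def pvInc (freq : List Int) (j : Nat) (d : Int) : List Int :=
  freq.set j (freq.getD j 0 + d)

-- the inner 'for l in reversed(range(51)): count += freq[l]; if count >= x: append(-l); break'
-- returns (the appended value if the break fired, the final count)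
def pvInnerA (freq : List Int) (x : Int) : List Nat → Int → Option Int × Int
  | [], count => (none, count)
  | l :: ls, count =>
      let count := count + freq.getD l 0
      if x ≤ count then (some (-(l : Int)), count) else pvInnerA freq x ls count

-- the main 'for i in range(len(nums))' loop with state (temp, freq, result)
def pvLoopA (nums : List Int) (k x : Int) : List Nat → Nat → List Int → List Int → List Int
  | [], _, _, result => result
  | i :: is, temp, freq, result =>
      let v := nums.getD i 0
      let freq := if v < 0 then pvInc freq v.natAbs 1 else freq
      if k ≤ (i : Int) - (temp : Int) + 1 then
        let r := pvInnerA freq x ((List.range 51).reverse) 0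
        let result := result ++ (match r.1 with | some w => [w] | none => [])
        let result := if r.2 < x then result ++ [0] else result
        let w := nums.getD temp 0
        let freq := if w < 0 then pvInc freq w.natAbs (-1) else freq
        pvLoopA nums k x is (temp + 1) freq result
      else
        pvLoopA nums k x is temp freq result

def solutions1 (nums : List Int) (k : Int) (x : Int) : List Int :=
  pvLoopA nums k x (List.range nums.length) 0 (List.replicate 51 0) []

-- ===== PORT B =====
-- fresh freq table of the window: freq[abs(v)] += 1 for each negative v
def pvFreqOf (window : List Int) : List Int :=
  window.foldl
    (fun f v => if v < 0 then f.set v.natAbs (f.getD v.natAbs 0 + 1) else f)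
    (List.replicate 51 0)

-- 'count' scan over reversed(range(51)); val stays 0 if the break never fires
def pvPick (freq : List Int) (x : Int) : List Nat → Int → Int
  | [], _ => 0
  | l :: ls, count =>
      let count := count + freq.getD l 0
      if x ≤ count then -(l : Int) else pvPick freq x ls count

def solutions1_alt (nums : List Int) (k : Int) (x : Int) : List Int :=
  (PySem.List.pyRange 0 ((nums.length : Int) - k + 1) 1).map (fun start =>
    pvPick (pvFreqOf (PySem.List.slice nums (some start) (some (start + k)))) x
      ((List.range 51).reverse) 0)

-- ===== PRECONDITION & SPEC =====
-- Pre_ excludes k ≤ 0 (outside the sliding-window task's natural domain; A's per-element windows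
-- there are an artefact of its pointer arithmetic, see cites) and negative elements below -50,
-- on which Python A raises IndexError at freq[abs(v)].
def Pre_solutions1 (nums : List Int) (k : Int) (x : Int) : Prop :=
  1 ≤ k ∧ ∀ v ∈ nums, v < 0 → -50 ≤ v
instance (nums : List Int) (k : Int) (x : Int) : Decidable (Pre_solutions1 nums k x) := by
  unfold Pre_solutions1; infer_instance

def pvWitness_solutions1 : List Int × Int × Int := ([-1, 2, -3], 2, 1)

def Spec_solutions1 (nums : List Int) (k : Int) (x : Int) (out : List Int) : Prop :=
  out = solutions1_alt nums k x
instance (nums : List Int) (k : Int) (x : Int) (out : List Int) : Decidable (Spec_solutions1 nums k x out) := by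
  unfold Spec_solutions1; infer_instance

-- ===== CLAIM (what is proved, stated in full; the proofs are below) =====
def Claim_equal_solutions1 : Prop := ∀ (nums : List Int) (k : Int) (x : Int), Dom_solutions1 nums k x → Pre_solutions1 nums k x → Spec_solutions1 nums k x (solutions1 nums k x)

-- ===== LEMMAS AND PROOFS =====

-- the fold step used by both ports (A via pvInc, B inline)
def pvBump (f : List Int) (v : Int) : List Int :=
  if v < 0 then f.set v.natAbs (f.getD v.natAbs 0 + 1) else f

-- A's removal step
def pvDec (f : List Int) (v : Int) : List Int :=
  if v < 0 then pvInc f v.natAbs (-1) else f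

theorem pvBump_eq_inc (f : List Int) (v : Int) :
    (if v < 0 then pvInc f v.natAbs 1 else f) = pvBump f v := by
  simp [pvInc, pvBump]

theorem length_pvBump (f : List Int) (v : Int) : (pvBump f v).length = f.length := by
  unfold pvBump; split <;> simp [pvInc]

theorem getD_set_self (f : List Int) (j : Nat) (a : Int) (h : j < f.length) :
    (f.set j a).getD j 0 = a := by
  simp [List.getD_eq_getElem?_getD, h]

theorem getD_set_ne (f : List Int) (j j' : Nat) (a : Int) (h : j ≠ j') :
    (f.set j a).getD j' 0 = f.getD j' 0 := by
  simp [List.getD_eq_getElem?_getD, List.getElem?_set_ne h]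

theorem pvDec_pvBump_self (f : List Int) (v : Int) (hv : v < 0 → v.natAbs < f.length) :
    pvDec (pvBump f v) v = f := by
  unfold pvBump pvDec pvInc
  split_ifs with h
  · rw [getD_set_self _ _ _ (hv h), List.set_set]
    have : f.getD v.natAbs 0 + 1 + -1 = f.getD v.natAbs 0 := by ring
    rw [this, List.getD_eq_getElem?_getD, List.getElem?_eq_getElem (hv h)]
    exact List.set_getElem_self (hv h)
  · rfl

theorem pvDec_pvBump_comm (f : List Int) (v w : Int)
    (hv : v < 0 → v.natAbs < f.length) :
    pvDec (pvBump f w) v = pvBump (pvDec f v) w := by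
  unfold pvBump pvDec pvInc
  split_ifs with h1 h2 <;> try rfl
  by_cases hij : w.natAbs = v.natAbs
  · rw [hij, getD_set_self _ _ _ (hv h1), getD_set_self _ _ _ (hv h1),
      List.set_set, List.set_set]
    congr 1
    ring
  · rw [getD_set_ne _ _ _ _ hij, getD_set_ne _ _ _ _ (fun h => hij h.symm),
      List.set_comm _ _ hij]

theorem pvDec_foldl (l : List Int) (v : Int) (f : List Int)
    (hv : v < 0 → v.natAbs < f.length) :
    pvDec (l.foldl pvBump f) v = (l.foldl pvBump (pvDec f v)) := by
  induction l generalizing f with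
  | nil => rfl
  | cons w l ih =>
      simp only [List.foldl_cons]
      rw [ih (pvBump f w) (fun h => by rw [length_pvBump]; exact hv h),
        pvDec_pvBump_comm f v w hv]

theorem pvDec_foldl_cons (l : List Int) (v : Int) (f : List Int)
    (hv : v < 0 → v.natAbs < f.length) :
    pvDec ((v :: l).foldl pvBump f) v = l.foldl pvBump f := by
  simp only [List.foldl_cons]
  rw [pvDec_foldl l v (pvBump f v) (fun h => by rw [length_pvBump]; exact hv h),
    pvDec_pvBump_self f v hv]

-- the inner-loop/append dance of A collapses to B's single picked value
theorem pvInnerA_pick (freq : List Int) (x : Int) (res : List Int) :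
    ∀ (ls : List Nat) (count : Int), count < x ∨ ls ≠ [] →
    (if (pvInnerA freq x ls count).2 < x
       then (res ++ (match (pvInnerA freq x ls count).1 with | some w => [w] | none => [])) ++ [0]
       else res ++ (match (pvInnerA freq x ls count).1 with | some w => [w] | none => []))
    = res ++ [pvPick freq x ls count] := by
  intro ls
  induction ls with
  | nil =>
      intro count h
      rcases h with h | h
      · simp [pvInnerA, pvPick, h]
      · exact absurd rfl h
  | cons l ls ih =>
      intro count _
      simp only [pvInnerA, pvPick]
      by_cases hc : x ≤ count + freq.getD l 0
      · rw [if_pos hc, if_pos hc]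
        simp only [not_lt.mpr hc, if_false]
      · rw [if_neg hc, if_neg hc]
        exact ih _ (Or.inl (not_le.mp hc))

theorem pvLoopA_main (nums : List Int) (k x : Int) (kn : Nat) (hk : (kn : Int) = k)
    (hgood : ∀ v ∈ nums, v < 0 → v.natAbs ≤ 50) :
    ∀ (m i temp : Nat) (res : List Int), i + m = nums.length → temp ≤ i →
      (i : Int) - (temp : Int) < k →
    pvLoopA nums k x (List.range' i m) temp
        (((nums.drop temp).take (i - temp)).foldl pvBump (List.replicate 51 0)) res
      = res ++ (List.range' temp (nums.length + 1 - kn - temp)).map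
          (fun start => pvPick (((nums.drop start).take kn).foldl pvBump (List.replicate 51 0)) x
            ((List.range 51).reverse) 0) := by
  intro m
  induction m with
  | zero =>
      intro i temp res hin htemp hwin
      rw [← hk] at hwin
      have hs : nums.length + 1 - kn - temp = 0 := by omega
      simp [pvLoopA, hs]
  | succ m ih =>
      intro i temp res hin htemp hwin
      rw [← hk] at hwin
      have hi : i < nums.length := by omega
      have hti : temp < nums.length := by omega
      have hvi : nums.getD i 0 = nums[i] := List.getD_eq_getElem nums 0 hi
      have hw' : (nums.drop temp).take (i + 1 - temp)
          = (nums.drop temp).take (i - temp) ++ [nums[i]] := by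
        rw [show i + 1 - temp = (i - temp) + 1 by omega, List.take_add_one]
        congr
        rw [List.getElem?_drop, show temp + (i - temp) = i by omega,
          List.getElem?_eq_getElem hi]
        rfl
      have hb : (if nums[i] < 0 then pvInc (((nums.drop temp).take (i - temp)).foldl pvBump
              (List.replicate 51 0)) nums[i].natAbs 1
            else ((nums.drop temp).take (i - temp)).foldl pvBump (List.replicate 51 0))
          = ((nums.drop temp).take (i + 1 - temp)).foldl pvBump (List.replicate 51 0) := by
        rw [pvBump_eq_inc, hw', List.foldl_append, List.foldl_cons, List.foldl_nil]
      rw [List.range'_succ]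
      simp only [pvLoopA, hvi, hb]
      by_cases hcond : k ≤ (i : Int) - (temp : Int) + 1
      · rw [if_pos hcond]
        rw [← hk] at hcond
        have hkeq : i + 1 = temp + kn := by omega
        rw [pvInnerA_pick _ x res _ 0 (Or.inr (by simp))]
        have hvt : nums.getD temp 0 = nums[temp] := List.getD_eq_getElem nums 0 hti
        have hcons : (nums.drop temp).take (i + 1 - temp)
            = nums[temp] :: ((nums.drop (temp + 1)).take (i - temp)) := by
          rw [List.drop_eq_getElem_cons hti,
            show i + 1 - temp = (i - temp) + 1 by omega, List.take_succ_cons]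
        have hdec : (if nums[temp] < 0 then
              pvInc (((nums.drop temp).take (i + 1 - temp)).foldl pvBump
                (List.replicate 51 0)) nums[temp].natAbs (-1)
            else ((nums.drop temp).take (i + 1 - temp)).foldl pvBump (List.replicate 51 0))
            = ((nums.drop (temp + 1)).take ((i + 1) - (temp + 1))).foldl pvBump
                (List.replicate 51 0) := by
          show pvDec _ _ = _
          rw [hcons, show (i + 1) - (temp + 1) = i - temp by omega]
          exact pvDec_foldl_cons _ _ _
            (fun h => by
              simpa using Nat.lt_succ_of_le (hgood nums[temp] (List.getElem_mem hti) h))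
        rw [hvt, hdec, ih (i + 1) (temp + 1) _ (by omega) (by omega)
          (by rw [← hk]; push_cast; omega)]
        have hs1 : nums.length + 1 - kn - temp = (nums.length + 1 - kn - (temp + 1)) + 1 := by
          omega
        rw [hs1, List.range'_succ, List.map_cons]
        rw [show (i + 1) - temp = kn by omega]
        simp
      · rw [if_neg hcond]
        rw [← hk] at hcond
        rw [show (nums.drop temp).take (i + 1 - temp)
              = (nums.drop temp).take ((i + 1) - temp) from rfl,
          ih (i + 1) temp res (by omega) (by omega) (by rw [← hk]; push_cast; omega)]

theorem solutions1_eq (nums : List Int) (k x : Int) (hp : Pre_solutions1 nums k x) :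
    solutions1 nums k x = solutions1_alt nums k x := by
  obtain ⟨hk1, hg⟩ := hp
  have hkn : ((k.toNat : Int)) = k := Int.toNat_of_nonneg (by omega)
  have hgood : ∀ v ∈ nums, v < 0 → v.natAbs ≤ 50 := by
    intro v hv hneg
    have := hg v hv hneg
    omega
  have main := pvLoopA_main nums k x k.toNat hkn hgood nums.length 0 0 []
    (by omega) (le_refl 0) (by rw [← hkn]; push_cast; omega)
  simp only [Nat.sub_self, List.take_zero, List.foldl_nil, List.nil_append, Nat.sub_zero,
    List.drop_zero] at main
  unfold solutions1
  rw [List.range_eq_range', main]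
  unfold solutions1_alt
  rw [PySem.List.pyRange_one]
  have hnt : (((nums.length : Int) - k + 1) - 0).toNat = nums.length + 1 - k.toNat := by
    omega
  rw [hnt, List.map_map, show List.range' 0 (nums.length + 1 - k.toNat)
      = List.range (nums.length + 1 - k.toNat) from List.range_eq_range'.symm]
  refine List.map_congr_left (fun j hj => ?_)
  simp only [Function.comp_apply, zero_add]
  rw [← hkn, PySem.List.slice_natCast_add]
  rfl

-- ===== VERDICT (by name: the statement is the Claim_ definition above) =====
theorem solutions1_spec : Claim_equal_solutions1 := by
  intro nums k x _ hp
  exact solutions1_eq nums k x hp
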